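-- pv_equiv track=rewrite | github.com/ethdav/SOF1-repo | SOF1 Problems/week 4/messingWithNumbers.py | pairwise_digits
-- ===== SOURCE A (Python) =====
-- def pairwise_digits(number_a, number_b):
--     if len(str(number_a)) > len(str(number_b)):
--         longer = str(number_a)
--         shorter = str(number_b)
--     else:
--         longer = str(number_b)
--         shorter = str(number_a)
--     result = ""
--     index = 0
--     while index < len(shorter):
--         if longer[index] == shorter[index]:
--             result += "1"
--         else:
--             result += "0"
--         index+=1
--     result += "0"*(len(longer)-len(shorter))
--     return result
-- ===== SOURCE B (Python) =====
-- def pairwise_digits(number_a, number_b):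
--     sa, sb = str(number_a), str(number_b)
--     longer, shorter = (sa, sb) if len(sa) > len(sb) else (sb, sa)
--     mask = 0
--     for a, b in zip(longer, shorter):
--         mask = (mask << 1) | (a == b)
--     mask <<= len(longer) - len(shorter)
--     return format(mask, '0{}b'.format(len(longer)))
-- ===== Notes on version B (the rewrite author's own statement) =====
-- stated objective: alternative
-- what changed: A accumulates a result string char by char and appends '0'-padding separately; B instead builds an integer bitmask by shifting in one bit per aligned pair, shifts in the padding zeros arithmetically, and renders the answer once via fixed-width binary formatting.
import Mathlib
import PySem

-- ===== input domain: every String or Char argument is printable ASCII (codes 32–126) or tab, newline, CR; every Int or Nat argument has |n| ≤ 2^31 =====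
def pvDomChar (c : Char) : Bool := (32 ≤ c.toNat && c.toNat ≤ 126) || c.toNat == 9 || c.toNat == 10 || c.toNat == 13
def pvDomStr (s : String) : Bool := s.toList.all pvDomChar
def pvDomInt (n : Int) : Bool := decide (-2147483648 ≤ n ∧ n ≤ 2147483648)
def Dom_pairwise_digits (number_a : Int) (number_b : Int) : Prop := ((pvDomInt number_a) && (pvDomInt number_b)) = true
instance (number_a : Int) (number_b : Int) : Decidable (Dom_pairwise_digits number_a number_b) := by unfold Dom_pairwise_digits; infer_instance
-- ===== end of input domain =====

-- B replaces A's char-by-char string accumulation plus separate '0'-padding by an integer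
-- bitmask (one bit shifted in per aligned pair, padding shifted in arithmetically) rendered
-- once as fixed-width binary; objective: alternative (same cost, different representation).


-- ===== PORT A =====
-- the while loop: index runs over shorter; shorter.length ≤ longer.length always holds,
-- so longer[index] never raises and the paired recursion is exact
def pairwiseLoopA : List Char → List Char → List Char
  | x :: xs, y :: ys => (if x == y then '1' else '0') :: pairwiseLoopA xs ys
  | _, _ => []

def pairwise_digits (number_a : Int) (number_b : Int) : String :=
  let sa := PySem.Int.toStr number_a
  let sb := PySem.Int.toStr number_b
  let p := if sa.toList.length > sb.toList.length then (sa, sb) else (sb, sa)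
  let longer := p.1.toList
  let shorter := p.2.toList
  String.ofList (pairwiseLoopA longer shorter ++
    List.replicate (longer.length - shorter.length) '0')

-- ===== PORT B =====
-- format(mask, '0Nb'): fixed-width binary with leading zeros; exact here since the mask
-- carries exactly one bit per position, so mask < 2^N always
def pvToBin : Nat → Nat → List Char
  | 0, _ => []
  | w+1, n => pvToBin w (n / 2) ++ [if n % 2 == 1 then '1' else '0']

def pairwise_digits_alt (number_a : Int) (number_b : Int) : String :=
  let sa := PySem.Int.toStr number_a
  let sb := PySem.Int.toStr number_b
  let p := if sa.toList.length > sb.toList.length then (sa, sb) else (sb, sa)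
  let longer := p.1.toList
  let shorter := p.2.toList
  -- (mask << 1) | (a == b) ported as 2*mask + bit: exact, the low bit is free; mask ≥ 0 always
  let mask := List.foldl (fun m (q : Char × Char) => 2 * m + (if q.1 == q.2 then 1 else 0))
    0 (longer.zip shorter)
  String.ofList (pvToBin longer.length (mask * 2 ^ (longer.length - shorter.length)))

-- ===== PRECONDITION & SPEC =====
def Spec_pairwise_digits (number_a : Int) (number_b : Int) (out : String) : Prop := out = pairwise_digits_alt number_a number_b
instance (number_a : Int) (number_b : Int) (out : String) : Decidable (Spec_pairwise_digits number_a number_b out) := by unfold Spec_pairwise_digits; infer_instance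

-- ===== CLAIM (what is proved, stated in full; the proofs are below) =====
def Claim_equal_pairwise_digits : Prop := ∀ (number_a : Int) (number_b : Int), Dom_pairwise_digits number_a number_b → Spec_pairwise_digits number_a number_b (pairwise_digits number_a number_b)

-- ===== LEMMAS AND PROOFS =====

-- the mask as a fold over the boolean match list
def pvOfBits (bs : List Bool) : Nat := bs.foldl (fun m b => 2 * m + (if b then 1 else 0)) 0

lemma pvToBin_ofBits (bs : List Bool) :
    pvToBin bs.length (pvOfBits bs) = bs.map (fun b => if b then '1' else '0') := by
  induction bs using List.reverseRecOn with
  | nil => simp [pvToBin, pvOfBits]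
  | append_singleton bs b ih =>
    have hfold : pvOfBits (bs ++ [b]) = 2 * pvOfBits bs + (if b then 1 else 0) := by
      simp [pvOfBits, List.foldl_append]
    have hlen : (bs ++ [b]).length = bs.length + 1 := by simp
    rw [hlen, hfold]
    cases b with
    | false =>
      simp [pvToBin]
      exact ih
    | true =>
      have h1 : (2 * pvOfBits bs + 1) / 2 = pvOfBits bs := by omega
      have h2 : (2 * pvOfBits bs + 1) % 2 = 1 := by omega
      simp [pvToBin, h1, h2]
      exact ih

lemma pvOfBits_append_replicate (bs : List Bool) (k : Nat) :
    pvOfBits (bs ++ List.replicate k false) = pvOfBits bs * 2 ^ k := by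
  have key : ∀ (k : Nat) (v : Nat),
      List.foldl (fun m b => 2 * m + (if b then 1 else 0)) v (List.replicate k false)
        = v * 2 ^ k := by
    intro k
    induction k with
    | zero => intro v; simp
    | succ n ih =>
      intro v
      rw [List.replicate_succ, List.foldl_cons, ih]
      simp [pow_succ]
      ring
  simp only [pvOfBits, List.foldl_append]
  exact key k _

lemma pairwiseLoopA_eq_zip (l s : List Char) :
    pairwiseLoopA l s = (l.zip s).map (fun q => if q.1 == q.2 then '1' else '0') := by
  induction l generalizing s with
  | nil => cases s <;> simp [pairwiseLoopA]
  | cons x xs ih => cases s <;> simp [pairwiseLoopA, ih]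

lemma pairwise_lists_eq (l s : List Char) (h : s.length ≤ l.length) :
    pairwiseLoopA l s ++ List.replicate (l.length - s.length) '0' =
      pvToBin l.length
        ((List.foldl (fun m (q : Char × Char) => 2 * m + (if q.1 == q.2 then 1 else 0))
            0 (l.zip s)) * 2 ^ (l.length - s.length)) := by
  set bs := (l.zip s).map (fun q : Char × Char => q.1 == q.2) with hbs
  have hmask : List.foldl (fun m (q : Char × Char) => 2 * m + (if q.1 == q.2 then 1 else 0))
      0 (l.zip s) = pvOfBits bs := by
    simp [pvOfBits, hbs, List.foldl_map]
  have hlen : bs.length = s.length := by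
    simp [hbs, List.length_zip, Nat.min_eq_right h]
  have htotal : (bs ++ List.replicate (l.length - s.length) false).length = l.length := by
    simp [hlen]; omega
  have hmain := pvToBin_ofBits (bs ++ List.replicate (l.length - s.length) false)
  rw [htotal] at hmain
  rw [hmask, ← pvOfBits_append_replicate, hmain]
  simp [pairwiseLoopA_eq_zip, hbs, List.map_map, List.map_replicate]

-- ===== VERDICT (by name: the statement is the Claim_ definition above) =====
theorem pairwise_digits_spec : Claim_equal_pairwise_digits := by
  intro number_a number_b _
  unfold Spec_pairwise_digits pairwise_digits pairwise_digits_alt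
  set sa := PySem.Int.toStr number_a
  set sb := PySem.Int.toStr number_b
  by_cases hlen : sa.toList.length > sb.toList.length
  · simp only [hlen, if_pos]
    exact congrArg String.ofList (pairwise_lists_eq _ _ (Nat.le_of_lt hlen))
  · simp only [hlen, if_false]
    exact congrArg String.ofList (pairwise_lists_eq _ _ (Nat.le_of_not_lt hlen))
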